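-- pv_equiv track=rewrite | github.com/attainu/project-vinayak-narayankar-au8 | main.py | checkregno
-- ===== SOURCE A (Python) =====
-- def checkregno(regno):
--     arr = regno.split("-")
--     checkstring = "ABCDEFGHIJKLMNOPQRSTUVWXYZ"
--     checknum = "1234567890"
--     if len(arr) != 4:
--         return False
--     else:
--         if len(arr[0]) == 2:
--
--             for char in arr[0]:
--                 if char not in checkstring:
--                     return False
--         else:
--             return False
--         if len(arr[1]) == 2:
--
--             for char in arr[1]:
--                 if char not in checknum:
--                     return False
--         else:
--             return False
--
--         if len(arr[2]) <= 2:
--             for char in arr[2]: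
--                 if char not in checkstring:
--                     return False
--         else:
--             return False
--
--         if len(arr[3]) <= 4:
--             for char in arr[3]:
--                 if char not in checknum:
--                     return False
--         else:
--             return False
--     return True
-- ===== SOURCE B (Python) =====
-- # Single-pass DFA: scan the string once, character by character, through a
-- # state machine for the pattern L L - D D - L{0,2} - D{0,4}; no splitting.
-- _TRANS = {
--     (0, 'L'): 1, (1, 'L'): 2, (2, '-'): 3,
--     (3, 'D'): 4, (4, 'D'): 5, (5, '-'): 6,
--     (6, 'L'): 7, (6, '-'): 9, (7, 'L'): 8, (7, '-'): 9, (8, '-'): 9,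
--     (9, 'D'): 10, (10, 'D'): 11, (11, 'D'): 12, (12, 'D'): 13,
-- }
--
-- def checkregno(regno):
--     state = 0
--     for ch in regno:
--         if ch in "ABCDEFGHIJKLMNOPQRSTUVWXYZ":
--             kind = 'L'
--         elif ch in "1234567890":
--             kind = 'D'
--         elif ch == '-':
--             kind = '-'
--         else:
--             return False
--         nxt = _TRANS.get((state, kind))
--         if nxt is None:
--             return False
--         state = nxt
--     return state >= 9
-- ===== Notes on version B (the rewrite author's own statement) =====
-- stated objective: alternative
-- what changed: Replaced split-into-parts plus four per-part length/membership check blocks by a single left-to-right pass through a 14-state finite automaton (transition table keyed by (state, char-class)), with no splitting and no per-part loops.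
import Mathlib
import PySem

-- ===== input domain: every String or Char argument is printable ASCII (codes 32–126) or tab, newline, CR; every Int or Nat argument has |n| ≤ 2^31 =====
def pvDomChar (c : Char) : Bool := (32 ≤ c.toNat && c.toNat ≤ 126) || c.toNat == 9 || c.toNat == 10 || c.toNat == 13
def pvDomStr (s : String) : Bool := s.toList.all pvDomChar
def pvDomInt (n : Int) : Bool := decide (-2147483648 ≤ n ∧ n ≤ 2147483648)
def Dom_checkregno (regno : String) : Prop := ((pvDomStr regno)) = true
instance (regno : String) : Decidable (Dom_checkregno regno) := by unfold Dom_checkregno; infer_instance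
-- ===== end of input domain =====

-- B replaces A's split-into-parts validation (four if/for blocks) by a single
-- left-to-right pass through a 14-state finite automaton — alternative algorithm, same cost.


-- ===== PORT A =====
-- "for char in part: if char not in cls: return False" — single-char membership `char in cls`
-- is Python substring membership, ported exactly with PySem.Str.isIn on the one-char string.
def pvLoopA (cls : String) : List Char → Bool
  | [] => true
  | c :: rest => if PySem.Str.isIn (String.ofList [c]) cls = false then false else pvLoopA cls rest

def checkregno (regno : String) : Bool :=
  let arr := (PySem.Str.split? regno "-").getD []   -- sep "-" ≠ "", so split? is always `some`
  let checkstring := "ABCDEFGHIJKLMNOPQRSTUVWXYZ"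
  let checknum := "1234567890"
  if arr.length ≠ 4 then false
  else
    -- arr[0] … arr[3]: in range because arr.length = 4, so getD's default is never used
    if PySem.Str.len (arr.getD 0 "") = 2 then
      if pvLoopA checkstring (arr.getD 0 "").toList then
        if PySem.Str.len (arr.getD 1 "") = 2 then
          if pvLoopA checknum (arr.getD 1 "").toList then
            if PySem.Str.len (arr.getD 2 "") ≤ 2 then
              if pvLoopA checkstring (arr.getD 2 "").toList then
                if PySem.Str.len (arr.getD 3 "") ≤ 4 then
                  if pvLoopA checknum (arr.getD 3 "").toList then true
                  else false
                else false
              else false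
            else false
          else false
        else false
      else false
    else false

-- ===== PORT B =====
-- the _TRANS dict of Source B, as a function (state, kind) ↦ next state; kind 'L'/'D'/'-'
def pvTrans (s : Nat) (kind : Char) : Option Nat :=
  PySem.Dict.get? (PySem.Dict.mk
    [((0, 'L'), 1), ((1, 'L'), 2), ((2, '-'), 3),
     ((3, 'D'), 4), ((4, 'D'), 5), ((5, '-'), 6),
     ((6, 'L'), 7), ((6, '-'), 9), ((7, 'L'), 8), ((7, '-'), 9), ((8, '-'), 9),
     ((9, 'D'), 10), ((10, 'D'), 11), ((11, 'D'), 12), ((12, 'D'), 13)]) (s, kind)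

-- classify ch, look the pair up, advance or return False — Source B's loop body
def pvStep (s : Nat) (c : Char) : Option Nat :=
  if PySem.Str.isIn (String.ofList [c]) "ABCDEFGHIJKLMNOPQRSTUVWXYZ" then pvTrans s 'L'
  else if PySem.Str.isIn (String.ofList [c]) "1234567890" then pvTrans s 'D'
  else if c = '-' then pvTrans s '-'
  else none

def pvRun (s : Nat) : List Char → Bool
  | [] => decide (9 ≤ s)
  | c :: rest =>
    match pvStep s c with
    | none => false
    | some s' => pvRun s' rest

def checkregno_alt (regno : String) : Bool := pvRun 0 regno.toList

-- ===== PRECONDITION & SPEC =====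
def Spec_checkregno (regno : String) (out : Bool) : Prop := out = checkregno_alt regno
instance (regno : String) (out : Bool) : Decidable (Spec_checkregno regno out) := by unfold Spec_checkregno; infer_instance

-- ===== CLAIM (what is proved, stated in full; the proofs are below) =====
def Claim_equal_checkregno : Prop := ∀ (regno : String), Dom_checkregno regno → Spec_checkregno regno (checkregno regno)

-- ===== LEMMAS AND PROOFS =====

-- proof-side split of a char list on '-' (matches Python str.split("-"))
def pvSplitDash : List Char → List (List Char)
  | [] => [[]]
  | c :: rest =>
    if c = '-' then [] :: pvSplitDash rest
    else
      match pvSplitDash rest with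
      | p :: ps => (c :: p) :: ps
      | [] => [[c]]   -- unreachable: pvSplitDash never returns []

theorem pvSplitDash_ne_nil (cs : List Char) : pvSplitDash cs ≠ [] := by
  cases cs with
  | nil => simp [pvSplitDash]
  | cons c rest =>
    simp only [pvSplitDash]
    split_ifs
    · simp
    · cases h : pvSplitDash rest <;> simp

theorem pvSplitDash_no_dash (cs : List Char) : ∀ p ∈ pvSplitDash cs, '-' ∉ p := by
  induction cs with
  | nil => simp [pvSplitDash]
  | cons c rest ih =>
    simp only [pvSplitDash]
    split_ifs with hc
    · intro p hp
      rw [List.mem_cons] at hp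
      rcases hp with hp | hp
      · simp [hp]
      · exact ih p hp
    · cases h : pvSplitDash rest with
      | nil => exact absurd h (pvSplitDash_ne_nil rest)
      | cons q qs =>
        intro p hp
        rw [List.mem_cons] at hp
        rcases hp with hp | hp
        · subst hp
          intro hm
          rw [List.mem_cons] at hm
          rcases hm with hm | hm
          · exact hc hm.symm
          · exact ih q (h ▸ List.mem_cons_self ..) hm
        · exact ih p (h ▸ List.mem_cons_of_mem _ hp)

-- one step of PySem's splitOn.go on separator "-"
theorem pvGo_step (f : Nat) (c : Char) (rest cur : List Char) (acc : List (List Char)) :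
    PySem.Chars.splitOn.go ['-'] (f+1) (c::rest) cur acc =
      if c = '-' then PySem.Chars.splitOn.go ['-'] f rest [] (cur.reverse :: acc)
      else PySem.Chars.splitOn.go ['-'] f rest (c :: cur) acc := by
  by_cases hc : c = '-'
  · subst hc; simp [PySem.Chars.splitOn.go, List.isPrefixOf]
  · rw [if_neg hc]
    rw [PySem.Chars.splitOn.go.eq_def]
    show (if List.isPrefixOf ['-'] (c::rest) = true then
        PySem.Chars.splitOn.go ['-'] f (List.drop ['-'].length (c::rest)) [] (cur.reverse :: acc)
      else PySem.Chars.splitOn.go ['-'] f rest (c :: cur) acc) = _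
    rw [if_neg (by
      rw [List.isPrefixOf_iff_prefix]
      simp only [List.cons_prefix_cons]
      exact fun h => hc (h.1.symm))]

-- PySem's splitOn.go on separator "-" computes pvSplitDash
theorem pvSplitOn_go (fuel : Nat) :
    ∀ (cs cur : List Char) (acc : List (List Char)), cs.length < fuel →
      PySem.Chars.splitOn.go ['-'] fuel cs cur acc
        = acc.reverse ++ (match pvSplitDash cs with
            | p :: ps => (cur.reverse ++ p) :: ps
            | [] => [cur.reverse]) := by
  induction fuel with
  | zero => intro cs cur acc h; omega
  | succ f ih =>
    intro cs cur acc h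
    cases cs with
    | nil =>
      simp [PySem.Chars.splitOn.go, pvSplitDash]
    | cons c rest =>
      rw [pvGo_step]
      by_cases hc : c = '-'
      · rw [if_pos hc]
        subst hc
        rw [ih rest [] (cur.reverse :: acc) (by simpa using Nat.lt_of_succ_lt_succ h)]
        cases hs : pvSplitDash rest with
        | nil => exact absurd hs (pvSplitDash_ne_nil rest)
        | cons p ps => simp [pvSplitDash, hs]
      · rw [if_neg hc]
        rw [ih rest (c :: cur) acc (by simpa using Nat.lt_of_succ_lt_succ h)]
        cases hs : pvSplitDash rest with
        | nil => exact absurd hs (pvSplitDash_ne_nil rest)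
        | cons p ps => simp [pvSplitDash, hs, hc]

theorem pvSplitOn_eq (cs : List Char) :
    PySem.Chars.splitOn cs ['-'] = pvSplitDash cs := by
  rw [PySem.Chars.splitOn, pvSplitOn_go (cs.length + 1) cs [] [] (by omega)]
  cases hs : pvSplitDash cs with
  | nil => exact absurd hs (pvSplitDash_ne_nil cs)
  | cons p ps => simp

-- abbreviations for the two character classes (exactly the tests both ports make)
def pvIsL (c : Char) : Bool := PySem.Str.isIn (String.ofList [c]) "ABCDEFGHIJKLMNOPQRSTUVWXYZ"
def pvIsD (c : Char) : Bool := PySem.Str.isIn (String.ofList [c]) "1234567890"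

theorem pvStep_eval (s : Nat) (c : Char) (h : ¬ c = '-') :
    pvStep s c = if pvIsL c then pvTrans s 'L' else if pvIsD c then pvTrans s 'D' else none := by
  simp [pvStep, h, pvIsL, pvIsD]

-- running the DFA through one dash-free part, then over a dash
def pvConsume? (s : Nat) : List Char → Option Nat
  | [] => some s
  | c :: rest =>
    match pvStep s c with
    | none => none
    | some s' => pvConsume? s' rest

def pvCD (s : Nat) (p : List Char) : Option Nat :=
  (pvConsume? s p).bind (fun s' => pvStep s' '-')

-- what remains of the DFA run, expressed over the list of dash-separated parts
def pvPsi (s : Nat) : List (List Char) → Bool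
  | [] => false
  | p :: ps =>
    match pvConsume? s p with
    | none => false
    | some s' =>
      match ps with
      | [] => decide (9 ≤ s')
      | _ :: _ =>
        match pvStep s' '-' with
        | none => false
        | some s'' => pvPsi s'' ps

-- the DFA run equals pvPsi over the dash-split of the input
theorem pvRun_eq (cs : List Char) : ∀ s, pvRun s cs = pvPsi s (pvSplitDash cs) := by
  induction cs with
  | nil => intro s; simp [pvRun, pvSplitDash, pvPsi, pvConsume?]
  | cons c rest ih =>
    intro s
    by_cases hc : c = '-'
    · subst hc
      rw [show pvSplitDash ('-' :: rest) = [] :: pvSplitDash rest by simp [pvSplitDash]]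
      cases hs : pvSplitDash rest with
      | nil => exact absurd hs (pvSplitDash_ne_nil rest)
      | cons p ps =>
        simp only [pvRun, pvPsi, pvConsume?]
        cases h2 : pvStep s '-' with
        | none => rfl
        | some s'' =>
          show pvRun s'' rest = pvPsi s'' (p :: ps)
          rw [ih s'', hs]
    · rw [show pvSplitDash (c :: rest) = (match pvSplitDash rest with
            | p :: ps => (c :: p) :: ps | [] => [[c]]) by simp [pvSplitDash, hc]]
      cases hs : pvSplitDash rest with
      | nil => exact absurd hs (pvSplitDash_ne_nil rest)
      | cons p ps =>
        simp only [pvRun, pvPsi, pvConsume?]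
        cases h2 : pvStep s c with
        | none => rfl
        | some s' =>
          show pvRun s' rest = pvPsi s' (p :: ps)
          rw [ih s', hs]


-- evaluated entries of the transition table (states 0–13 × kinds L, D, '-')
theorem pvT_0_L : pvTrans 0 'L' = some 1 := by decide
theorem pvT_0_D : pvTrans 0 'D' = none := by decide
theorem pvT_0_H : pvTrans 0 '-' = none := by decide
theorem pvT_1_L : pvTrans 1 'L' = some 2 := by decide
theorem pvT_1_D : pvTrans 1 'D' = none := by decide
theorem pvT_1_H : pvTrans 1 '-' = none := by decide
theorem pvT_2_L : pvTrans 2 'L' = none := by decide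
theorem pvT_2_D : pvTrans 2 'D' = none := by decide
theorem pvT_2_H : pvTrans 2 '-' = some 3 := by decide
theorem pvT_3_L : pvTrans 3 'L' = none := by decide
theorem pvT_3_D : pvTrans 3 'D' = some 4 := by decide
theorem pvT_3_H : pvTrans 3 '-' = none := by decide
theorem pvT_4_L : pvTrans 4 'L' = none := by decide
theorem pvT_4_D : pvTrans 4 'D' = some 5 := by decide
theorem pvT_4_H : pvTrans 4 '-' = none := by decide
theorem pvT_5_L : pvTrans 5 'L' = none := by decide
theorem pvT_5_D : pvTrans 5 'D' = none := by decide
theorem pvT_5_H : pvTrans 5 '-' = some 6 := by decide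
theorem pvT_6_L : pvTrans 6 'L' = some 7 := by decide
theorem pvT_6_D : pvTrans 6 'D' = none := by decide
theorem pvT_6_H : pvTrans 6 '-' = some 9 := by decide
theorem pvT_7_L : pvTrans 7 'L' = some 8 := by decide
theorem pvT_7_D : pvTrans 7 'D' = none := by decide
theorem pvT_7_H : pvTrans 7 '-' = some 9 := by decide
theorem pvT_8_L : pvTrans 8 'L' = none := by decide
theorem pvT_8_D : pvTrans 8 'D' = none := by decide
theorem pvT_8_H : pvTrans 8 '-' = some 9 := by decide
theorem pvT_9_L : pvTrans 9 'L' = none := by decide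
theorem pvT_9_D : pvTrans 9 'D' = some 10 := by decide
theorem pvT_9_H : pvTrans 9 '-' = none := by decide
theorem pvT_10_L : pvTrans 10 'L' = none := by decide
theorem pvT_10_D : pvTrans 10 'D' = some 11 := by decide
theorem pvT_10_H : pvTrans 10 '-' = none := by decide
theorem pvT_11_L : pvTrans 11 'L' = none := by decide
theorem pvT_11_D : pvTrans 11 'D' = some 12 := by decide
theorem pvT_11_H : pvTrans 11 '-' = none := by decide
theorem pvT_12_L : pvTrans 12 'L' = none := by decide
theorem pvT_12_D : pvTrans 12 'D' = some 13 := by decide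
theorem pvT_12_H : pvTrans 12 '-' = none := by decide
theorem pvT_13_L : pvTrans 13 'L' = none := by decide
theorem pvT_13_D : pvTrans 13 'D' = none := by decide
theorem pvT_13_H : pvTrans 13 '-' = none := by decide

-- the two character classes are disjoint (uppercase letters vs digits)
theorem pvSingletonInfix {c : Char} {l : List Char} : [c] <:+: l ↔ c ∈ l := by
  constructor
  · intro h
    exact h.sublist.subset (List.mem_singleton_self _)
  · intro h
    obtain ⟨l1, l2, hx⟩ := List.append_of_mem h
    exact ⟨l1, l2, by rw [hx]; simp⟩

theorem pvIsL_mem (c : Char) :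
    pvIsL c = true ↔ c ∈ ['A','B','C','D','E','F','G','H','I','J','K','L','M',
      'N','O','P','Q','R','S','T','U','V','W','X','Y','Z'] := by
  rw [pvIsL, PySem.Str.isIn_iff_infix]
  simp only [String.toList_ofList]
  rw [show "ABCDEFGHIJKLMNOPQRSTUVWXYZ".toList = ['A','B','C','D','E','F','G','H','I','J',
    'K','L','M','N','O','P','Q','R','S','T','U','V','W','X','Y','Z'] from by decide]
  exact pvSingletonInfix

theorem pvIsD_mem (c : Char) :
    pvIsD c = true ↔ c ∈ ['1','2','3','4','5','6','7','8','9','0'] := by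
  rw [pvIsD, PySem.Str.isIn_iff_infix]
  simp only [String.toList_ofList]
  rw [show "1234567890".toList = ['1','2','3','4','5','6','7','8','9','0'] from by decide]
  exact pvSingletonInfix

theorem pv_not_both (c : Char) (hL : pvIsL c = true) : pvIsD c = false := by
  have h1 := (pvIsL_mem c).mp hL
  by_contra hD
  have h2 := (pvIsD_mem c).mp (by revert hD; cases pvIsD c <;> simp)
  fin_cases h1 <;> exact absurd h2 (by decide)

-- a non-dash step from states 0–8 stays in states 0–8
theorem pvStep_le (s : Nat) (c : Char) (s'' : Nat) (hc : ¬ c = '-') (hs : s ≤ 8) :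
    pvStep s c = some s'' → s'' ≤ 8 := by
  rw [pvStep_eval s c hc]
  interval_cases s <;> by_cases hL : pvIsL c <;> by_cases hD : pvIsD c <;>
    simp [hL, hD, pvT_0_L, pvT_0_D, pvT_0_H, pvT_1_L, pvT_1_D, pvT_1_H, pvT_2_L, pvT_2_D, pvT_2_H, pvT_3_L, pvT_3_D, pvT_3_H, pvT_4_L, pvT_4_D, pvT_4_H, pvT_5_L, pvT_5_D, pvT_5_H, pvT_6_L, pvT_6_D, pvT_6_H, pvT_7_L, pvT_7_D, pvT_7_H, pvT_8_L, pvT_8_D, pvT_8_H, pvT_9_L, pvT_9_D, pvT_9_H, pvT_10_L, pvT_10_D, pvT_10_H, pvT_11_L, pvT_11_D, pvT_11_H, pvT_12_L, pvT_12_D, pvT_12_H, pvT_13_L, pvT_13_D, pvT_13_H] <;> omega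

theorem pvConsume_le (p : List Char) : ∀ s s', '-' ∉ p → s ≤ 8 →
    pvConsume? s p = some s' → s' ≤ 8 := by
  induction p with
  | nil => intro s s' _ hs h; simp [pvConsume?] at h; omega
  | cons c rest ih =>
    intro s s' hnd hs h
    have hc : ¬ c = '-' := fun e => hnd (by simp [e])
    simp only [pvConsume?] at h
    cases hst : pvStep s c with
    | none => rw [hst] at h; cases h
    | some s1 =>
      rw [hst] at h
      exact ih s1 s' (fun hm => hnd (List.mem_cons_of_mem _ hm)) (pvStep_le s c s1 hc hs hst) h

-- characterizations of one part + the following dash, per segment of the machine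
theorem pvCD0 (p : List Char) (h : '-' ∉ p) :
    pvCD 0 p = if p.length = 2 ∧ p.all pvIsL then some 3 else none := by
  rcases p with _ | ⟨a, _ | ⟨b, _ | ⟨c, rest⟩⟩⟩
  · decide
  · have ha : ¬ a = '-' := fun e => h (by simp [e])
    by_cases hL : pvIsL a <;> by_cases hD : pvIsD a <;>
      simp [pvCD, pvConsume?, pvStep_eval, ha, hL, hD, pvT_0_L, pvT_0_D, pvT_0_H, pvT_1_L, pvT_1_D, pvT_1_H, pvT_2_L, pvT_2_D, pvT_2_H, pvT_3_L, pvT_3_D, pvT_3_H, pvT_4_L, pvT_4_D, pvT_4_H, pvT_5_L, pvT_5_D, pvT_5_H, pvT_6_L, pvT_6_D, pvT_6_H, pvT_7_L, pvT_7_D, pvT_7_H, pvT_8_L, pvT_8_D, pvT_8_H, pvT_9_L, pvT_9_D, pvT_9_H, pvT_10_L, pvT_10_D, pvT_10_H, pvT_11_L, pvT_11_D, pvT_11_H, pvT_12_L, pvT_12_D, pvT_12_H, pvT_13_L, pvT_13_D, pvT_13_H] <;> try decide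
  · have ha : ¬ a = '-' := fun e => h (by simp [e])
    have hb : ¬ b = '-' := fun e => h (by simp [e])
    by_cases hLa : pvIsL a <;> by_cases hDa : pvIsD a <;>
      by_cases hLb : pvIsL b <;> by_cases hDb : pvIsD b <;>
      simp [pvCD, pvConsume?, pvStep_eval, ha, hb, hLa, hDa, hLb, hDb, pvT_0_L, pvT_0_D, pvT_0_H, pvT_1_L, pvT_1_D, pvT_1_H, pvT_2_L, pvT_2_D, pvT_2_H, pvT_3_L, pvT_3_D, pvT_3_H, pvT_4_L, pvT_4_D, pvT_4_H, pvT_5_L, pvT_5_D, pvT_5_H, pvT_6_L, pvT_6_D, pvT_6_H, pvT_7_L, pvT_7_D, pvT_7_H, pvT_8_L, pvT_8_D, pvT_8_H, pvT_9_L, pvT_9_D, pvT_9_H, pvT_10_L, pvT_10_D, pvT_10_H, pvT_11_L, pvT_11_D, pvT_11_H, pvT_12_L, pvT_12_D, pvT_12_H, pvT_13_L, pvT_13_D, pvT_13_H] <;> try decide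
  · have ha : ¬ a = '-' := fun e => h (by simp [e])
    have hb : ¬ b = '-' := fun e => h (by simp [e])
    have hc : ¬ c = '-' := fun e => h (by simp [e])
    by_cases hLa : pvIsL a <;> by_cases hDa : pvIsD a <;>
      by_cases hLb : pvIsL b <;> by_cases hDb : pvIsD b <;>
      by_cases hLc : pvIsL c <;> by_cases hDc : pvIsD c <;>
      simp [pvCD, pvConsume?, pvStep_eval, ha, hb, hc, hLa, hDa, hLb, hDb, hLc, hDc, pvT_0_L, pvT_0_D, pvT_0_H, pvT_1_L, pvT_1_D, pvT_1_H, pvT_2_L, pvT_2_D, pvT_2_H, pvT_3_L, pvT_3_D, pvT_3_H, pvT_4_L, pvT_4_D, pvT_4_H, pvT_5_L, pvT_5_D, pvT_5_H, pvT_6_L, pvT_6_D, pvT_6_H, pvT_7_L, pvT_7_D, pvT_7_H, pvT_8_L, pvT_8_D, pvT_8_H, pvT_9_L, pvT_9_D, pvT_9_H, pvT_10_L, pvT_10_D, pvT_10_H, pvT_11_L, pvT_11_D, pvT_11_H, pvT_12_L, pvT_12_D, pvT_12_H, pvT_13_L, pvT_13_D, pvT_13_H] <;> try decide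

theorem pvCD3 (p : List Char) (h : '-' ∉ p) :
    pvCD 3 p = if p.length = 2 ∧ p.all pvIsD then some 6 else none := by
  rcases p with _ | ⟨a, _ | ⟨b, _ | ⟨c, rest⟩⟩⟩
  · decide
  · have ha : ¬ a = '-' := fun e => h (by simp [e])
    by_cases hL : pvIsL a <;> by_cases hD : pvIsD a <;>
      simp [pvCD, pvConsume?, pvStep_eval, ha, hL, hD, pvT_0_L, pvT_0_D, pvT_0_H, pvT_1_L, pvT_1_D, pvT_1_H, pvT_2_L, pvT_2_D, pvT_2_H, pvT_3_L, pvT_3_D, pvT_3_H, pvT_4_L, pvT_4_D, pvT_4_H, pvT_5_L, pvT_5_D, pvT_5_H, pvT_6_L, pvT_6_D, pvT_6_H, pvT_7_L, pvT_7_D, pvT_7_H, pvT_8_L, pvT_8_D, pvT_8_H, pvT_9_L, pvT_9_D, pvT_9_H, pvT_10_L, pvT_10_D, pvT_10_H, pvT_11_L, pvT_11_D, pvT_11_H, pvT_12_L, pvT_12_D, pvT_12_H, pvT_13_L, pvT_13_D, pvT_13_H] <;> try decide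
  · have ha : ¬ a = '-' := fun e => h (by simp [e])
    have hb : ¬ b = '-' := fun e => h (by simp [e])
    by_cases hLa : pvIsL a <;> by_cases hDa : pvIsD a <;>
      by_cases hLb : pvIsL b <;> by_cases hDb : pvIsD b <;>
      simp [pvCD, pvConsume?, pvStep_eval, ha, hb, hLa, hDa, hLb, hDb, pv_not_both, pvT_0_L, pvT_0_D, pvT_0_H, pvT_1_L, pvT_1_D, pvT_1_H, pvT_2_L, pvT_2_D, pvT_2_H, pvT_3_L, pvT_3_D, pvT_3_H, pvT_4_L, pvT_4_D, pvT_4_H, pvT_5_L, pvT_5_D, pvT_5_H, pvT_6_L, pvT_6_D, pvT_6_H, pvT_7_L, pvT_7_D, pvT_7_H, pvT_8_L, pvT_8_D, pvT_8_H, pvT_9_L, pvT_9_D, pvT_9_H, pvT_10_L, pvT_10_D, pvT_10_H, pvT_11_L, pvT_11_D, pvT_11_H, pvT_12_L, pvT_12_D, pvT_12_H, pvT_13_L, pvT_13_D, pvT_13_H] <;>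
      first
        | decide
        | (exact absurd (pv_not_both a hLa) (by simp [hDa]))
        | (exact absurd (pv_not_both b hLb) (by simp [hDb]))
  · have ha : ¬ a = '-' := fun e => h (by simp [e])
    have hb : ¬ b = '-' := fun e => h (by simp [e])
    have hc : ¬ c = '-' := fun e => h (by simp [e])
    by_cases hLa : pvIsL a <;> by_cases hDa : pvIsD a <;>
      by_cases hLb : pvIsL b <;> by_cases hDb : pvIsD b <;>
      by_cases hLc : pvIsL c <;> by_cases hDc : pvIsD c <;>
      simp [pvCD, pvConsume?, pvStep_eval, ha, hb, hc, hLa, hDa, hLb, hDb, hLc, hDc, pvT_0_L, pvT_0_D, pvT_0_H, pvT_1_L, pvT_1_D, pvT_1_H, pvT_2_L, pvT_2_D, pvT_2_H, pvT_3_L, pvT_3_D, pvT_3_H, pvT_4_L, pvT_4_D, pvT_4_H, pvT_5_L, pvT_5_D, pvT_5_H, pvT_6_L, pvT_6_D, pvT_6_H, pvT_7_L, pvT_7_D, pvT_7_H, pvT_8_L, pvT_8_D, pvT_8_H, pvT_9_L, pvT_9_D, pvT_9_H, pvT_10_L, pvT_10_D, pvT_10_H, pvT_11_L, pvT_11_D,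 pvT_11_H, pvT_12_L, pvT_12_D, pvT_12_H, pvT_13_L, pvT_13_D, pvT_13_H] <;> try decide

theorem pvCD6 (p : List Char) (h : '-' ∉ p) :
    pvCD 6 p = if p.length ≤ 2 ∧ p.all pvIsL then some 9 else none := by
  rcases p with _ | ⟨a, _ | ⟨b, _ | ⟨c, rest⟩⟩⟩
  · decide
  · have ha : ¬ a = '-' := fun e => h (by simp [e])
    by_cases hL : pvIsL a <;> by_cases hD : pvIsD a <;>
      simp [pvCD, pvConsume?, pvStep_eval, ha, hL, hD, pvT_0_L, pvT_0_D, pvT_0_H, pvT_1_L, pvT_1_D, pvT_1_H, pvT_2_L, pvT_2_D, pvT_2_H, pvT_3_L, pvT_3_D, pvT_3_H, pvT_4_L, pvT_4_D, pvT_4_H, pvT_5_L, pvT_5_D, pvT_5_H, pvT_6_L, pvT_6_D, pvT_6_H, pvT_7_L, pvT_7_D, pvT_7_H, pvT_8_L, pvT_8_D, pvT_8_H, pvT_9_L, pvT_9_D, pvT_9_H, pvT_10_L, pvT_10_D, pvT_10_H, pvT_11_L, pvT_11_D, pvT_11_H, pvT_12_L, pvT_12_D, pvT_12_H, pvT_13_L,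 pvT_13_D, pvT_13_H] <;> try decide
  · have ha : ¬ a = '-' := fun e => h (by simp [e])
    have hb : ¬ b = '-' := fun e => h (by simp [e])
    by_cases hLa : pvIsL a <;> by_cases hDa : pvIsD a <;>
      by_cases hLb : pvIsL b <;> by_cases hDb : pvIsD b <;>
      simp [pvCD, pvConsume?, pvStep_eval, ha, hb, hLa, hDa, hLb, hDb, pvT_0_L, pvT_0_D, pvT_0_H, pvT_1_L, pvT_1_D, pvT_1_H, pvT_2_L, pvT_2_D, pvT_2_H, pvT_3_L, pvT_3_D, pvT_3_H, pvT_4_L, pvT_4_D, pvT_4_H, pvT_5_L, pvT_5_D, pvT_5_H, pvT_6_L, pvT_6_D, pvT_6_H, pvT_7_L, pvT_7_D, pvT_7_H, pvT_8_L, pvT_8_D, pvT_8_H, pvT_9_L, pvT_9_D, pvT_9_H, pvT_10_L, pvT_10_D, pvT_10_H, pvT_11_L, pvT_11_D, pvT_11_H, pvT_12_L, pvT_12_D, pvT_12_H, pvT_13_L, pvT_13_D, pvT_13_H] <;> try decide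
  · have ha : ¬ a = '-' := fun e => h (by simp [e])
    have hb : ¬ b = '-' := fun e => h (by simp [e])
    have hc : ¬ c = '-' := fun e => h (by simp [e])
    by_cases hLa : pvIsL a <;> by_cases hDa : pvIsD a <;>
      by_cases hLb : pvIsL b <;> by_cases hDb : pvIsD b <;>
      by_cases hLc : pvIsL c <;> by_cases hDc : pvIsD c <;>
      simp [pvCD, pvConsume?, pvStep_eval, ha, hb, hc, hLa, hDa, hLb, hDb, hLc, hDc, pvT_0_L, pvT_0_D, pvT_0_H, pvT_1_L, pvT_1_D, pvT_1_H, pvT_2_L, pvT_2_D, pvT_2_H, pvT_3_L, pvT_3_D, pvT_3_H, pvT_4_L, pvT_4_D, pvT_4_H, pvT_5_L, pvT_5_D, pvT_5_H, pvT_6_L, pvT_6_D, pvT_6_H, pvT_7_L, pvT_7_D, pvT_7_H, pvT_8_L, pvT_8_D, pvT_8_H, pvT_9_L, pvT_9_D, pvT_9_H, pvT_10_L, pvT_10_D, pvT_10_H, pvT_11_L, pvT_11_D, pvT_11_H, pvT_12_L, pvT_12_D, pvT_12_H, pvT_13_L, pvT_13_D, pvT_13_H] <;> try decide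

-- a fifth dash is never accepted: from states 9–13 no dash transition exists
theorem pvCD9' (p : List Char) : ∀ s, '-' ∉ p → 9 ≤ s → s ≤ 13 → pvCD s p = none := by
  induction p with
  | nil =>
    intro s _ h9 h13
    interval_cases s <;> decide
  | cons c rest ih =>
    intro s hnd h9 h13
    have hc : ¬ c = '-' := fun e => hnd (by simp [e])
    have hrest : '-' ∉ rest := fun hm => hnd (List.mem_cons_of_mem _ hm)
    simp only [pvCD, pvConsume?]
    rw [pvStep_eval s c hc]
    by_cases hL : pvIsL c
    · rw [if_pos hL]
      interval_cases s <;> simp [pvT_9_L, pvT_10_L, pvT_11_L, pvT_12_L, pvT_13_L]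
    · by_cases hD : pvIsD c
      · rw [if_neg hL, if_pos hD]
        interval_cases s
        · rw [pvT_9_D]; simpa [pvCD] using ih 10 hrest (by omega) (by omega)
        · rw [pvT_10_D]; simpa [pvCD] using ih 11 hrest (by omega) (by omega)
        · rw [pvT_11_D]; simpa [pvCD] using ih 12 hrest (by omega) (by omega)
        · rw [pvT_12_D]; simpa [pvCD] using ih 13 hrest (by omega) (by omega)
        · rw [pvT_13_D]; simp
      · rw [if_neg hL, if_neg hD]; simp

theorem pvCD9 (p : List Char) (h : '-' ∉ p) : pvCD 9 p = none :=
  pvCD9' p 9 h (by omega) (by omega)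

-- last part from state 9: accepting iff at most 13 - s further digits
theorem pvLast9' (p : List Char) : ∀ s, '-' ∉ p → 9 ≤ s → s ≤ 13 →
    (match pvConsume? s p with
      | none => false
      | some s' => decide (9 ≤ s'))
      = (decide (p.length + s ≤ 13) && p.all pvIsD) := by
  induction p with
  | nil =>
    intro s _ h9 h13
    simp only [pvConsume?, List.length_nil, List.all_nil, Bool.and_true, Nat.zero_add]
    exact decide_eq_decide.mpr (by omega)
  | cons c rest ih =>
    intro s hnd h9 h13
    have hc : ¬ c = '-' := fun e => hnd (by simp [e])
    have hrest : '-' ∉ rest := fun hm => hnd (List.mem_cons_of_mem _ hm)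
    simp only [pvConsume?]
    rw [pvStep_eval s c hc]
    by_cases hL : pvIsL c
    · have hD0 : pvIsD c = false := pv_not_both c hL
      rw [if_pos hL]
      interval_cases s <;>
        simp only [pvT_9_L, pvT_10_L, pvT_11_L, pvT_12_L, pvT_13_L] <;>
        simp [hD0]
    · by_cases hD : pvIsD c
      · rw [if_neg hL, if_pos hD]
        interval_cases s
        · rw [pvT_9_D]
          show (match pvConsume? 10 rest with | none => false | some s' => decide (9 ≤ s')) = _
          rw [ih 10 hrest (by omega) (by omega)]
          simp only [List.length_cons, List.all_cons, hD, Bool.true_and]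
          first
            | rfl
            | (congr 1
               exact decide_eq_decide.mpr (by omega))
        · rw [pvT_10_D]
          show (match pvConsume? 11 rest with | none => false | some s' => decide (9 ≤ s')) = _
          rw [ih 11 hrest (by omega) (by omega)]
          simp only [List.length_cons, List.all_cons, hD, Bool.true_and]
          first
            | rfl
            | (congr 1
               exact decide_eq_decide.mpr (by omega))
        · rw [pvT_11_D]
          show (match pvConsume? 12 rest with | none => false | some s' => decide (9 ≤ s')) = _
          rw [ih 12 hrest (by omega) (by omega)]
          simp only [List.length_cons, List.all_cons, hD, Bool.true_and]
          first
            | rfl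
            | (congr 1
               exact decide_eq_decide.mpr (by omega))
        · rw [pvT_12_D]
          show (match pvConsume? 13 rest with | none => false | some s' => decide (9 ≤ s')) = _
          rw [ih 13 hrest (by omega) (by omega)]
          simp only [List.length_cons, List.all_cons, hD, Bool.true_and]
          first
            | rfl
            | (congr 1
               exact decide_eq_decide.mpr (by omega))
        · rw [pvT_13_D]
          show (false : Bool) = _
          rw [show decide ((c :: rest).length + 13 ≤ 13) = false from
            decide_eq_false (by simp)]
          simp
      · have hD0 : pvIsD c = false := by
          cases h : pvIsD c
          · rfl
          · exact absurd h hD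
        rw [if_neg hL, if_neg hD]
        show (false : Bool) = _
        simp [hD0]

theorem pvLast9 (p : List Char) (h : '-' ∉ p) :
    (match pvConsume? 9 p with
      | none => false
      | some s' => decide (9 ≤ s'))
      = (decide (p.length ≤ 4) && p.all pvIsD) := by
  rw [pvLast9' p 9 h (by omega) (by omega)]
  congr 1
  exact decide_eq_decide.mpr (by omega)

-- pvPsi chain step: one non-final part followed by a dash
theorem pvPsi_cons (s : Nat) (p : List Char) (ps : List (List Char)) (hps : ps ≠ []) :
    pvPsi s (p :: ps) = match pvCD s p with
      | none => false
      | some s'' => pvPsi s'' ps := by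
  cases ps with
  | nil => exact absurd rfl hps
  | cons q qs =>
    simp only [pvPsi, pvCD]
    cases pvConsume? s p with
    | none => rfl
    | some s' => cases pvStep s' '-' <;> rfl

-- a final part reached in states 0–8 is never accepting
theorem psiLast_low (s : Nat) (p : List Char) (h : '-' ∉ p) (hs : s ≤ 8) :
    pvPsi s [p] = false := by
  simp only [pvPsi]
  cases hcp : pvConsume? s p with
  | none => rfl
  | some s' =>
    have hle := pvConsume_le p s s' h hs hcp
    exact decide_eq_false (by omega)

theorem pvAnd_false {a : Prop} [Decidable a] {b : Bool} (h : ¬ (a ∧ b = true)) :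
    (decide a && b) = false := by
  rcases not_and_or.mp h with h | h
  · simp [h]
  · simp [Bool.not_eq_true] at h; simp [h]

theorem psi1 (p : List Char) (hp : '-' ∉ p) : pvPsi 0 [p] = false :=
  psiLast_low 0 p hp (by omega)

theorem psi2 (p q : List Char) (hp : '-' ∉ p) (hq : '-' ∉ q) :
    pvPsi 0 [p, q] = false := by
  rw [pvPsi_cons _ _ _ (by simp), pvCD0 p hp]
  by_cases c1 : p.length = 2 ∧ p.all pvIsL
  · rw [if_pos c1]
    exact psiLast_low 3 q hq (by omega)
  · rw [if_neg c1]

theorem psi3 (p q r : List Char) (hp : '-' ∉ p) (hq : '-' ∉ q) (hr : '-' ∉ r) :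
    pvPsi 0 [p, q, r] = false := by
  rw [pvPsi_cons _ _ _ (by simp), pvCD0 p hp]
  by_cases c1 : p.length = 2 ∧ p.all pvIsL
  · rw [if_pos c1]
    show pvPsi 3 [q, r] = false
    rw [pvPsi_cons _ _ _ (by simp), pvCD3 q hq]
    by_cases c2 : q.length = 2 ∧ q.all pvIsD
    · rw [if_pos c2]
      exact psiLast_low 6 r hr (by omega)
    · rw [if_neg c2]
  · rw [if_neg c1]

theorem psi5 (p q r t u : List Char) (ps : List (List Char))
    (hp : '-' ∉ p) (hq : '-' ∉ q) (hr : '-' ∉ r) (ht : '-' ∉ t) :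
    pvPsi 0 (p :: q :: r :: t :: u :: ps) = false := by
  rw [pvPsi_cons _ _ _ (by simp), pvCD0 p hp]
  by_cases c1 : p.length = 2 ∧ p.all pvIsL
  · rw [if_pos c1]
    show pvPsi 3 (q :: r :: t :: u :: ps) = false
    rw [pvPsi_cons _ _ _ (by simp), pvCD3 q hq]
    by_cases c2 : q.length = 2 ∧ q.all pvIsD
    · rw [if_pos c2]
      show pvPsi 6 (r :: t :: u :: ps) = false
      rw [pvPsi_cons _ _ _ (by simp), pvCD6 r hr]
      by_cases c3 : r.length ≤ 2 ∧ r.all pvIsL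
      · rw [if_pos c3]
        show pvPsi 9 (t :: u :: ps) = false
        rw [pvPsi_cons _ _ _ (by simp), pvCD9 t ht]
      · rw [if_neg c3]
    · rw [if_neg c2]
  · rw [if_neg c1]

theorem psi4 (p q r t : List Char)
    (hp : '-' ∉ p) (hq : '-' ∉ q) (hr : '-' ∉ r) (ht : '-' ∉ t) :
    pvPsi 0 [p, q, r, t]
      = ((decide (p.length = 2) && p.all pvIsL) &&
         ((decide (q.length = 2) && q.all pvIsD) &&
          ((decide (r.length ≤ 2) && r.all pvIsL) &&
           (decide (t.length ≤ 4) && t.all pvIsD)))) := by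
  rw [pvPsi_cons _ _ _ (by simp), pvCD0 p hp]
  by_cases c1 : p.length = 2 ∧ p.all pvIsL
  · rw [if_pos c1]
    show pvPsi 3 [q, r, t] = _
    rw [pvPsi_cons _ _ _ (by simp), pvCD3 q hq]
    by_cases c2 : q.length = 2 ∧ q.all pvIsD
    · rw [if_pos c2]
      show pvPsi 6 [r, t] = _
      rw [pvPsi_cons _ _ _ (by simp), pvCD6 r hr]
      by_cases c3 : r.length ≤ 2 ∧ r.all pvIsL
      · rw [if_pos c3]
        show pvPsi 9 [t] = _
        have h9 : pvPsi 9 [t] = (decide (t.length ≤ 4) && t.all pvIsD) := by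
          simp only [pvPsi]
          exact pvLast9 t ht
        rw [h9]
        simp [c1.1, c1.2, c2.1, c2.2, c3.1, c3.2]
      · rw [if_neg c3, pvAnd_false c3]
        simp
    · rw [if_neg c2, pvAnd_false c2]
      simp
  · rw [if_neg c1, pvAnd_false c1]
    simp

-- the loops of port A are List.all over the same membership test
theorem pvLoopA_eq_all (cls : String) (l : List Char) :
    pvLoopA cls l = l.all (fun c => PySem.Str.isIn (String.ofList [c]) cls) := by
  induction l with
  | nil => rfl
  | cons c rest ih =>
    by_cases h : PySem.Str.isIn (String.ofList [c]) cls = false <;>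
      simp [pvLoopA, ih, h]

-- the split made by port A is pvSplitDash
theorem pvArr_eq (regno : String) :
    (PySem.Str.split? regno "-").getD []
      = (pvSplitDash regno.toList).map String.ofList := by
  rw [PySem.Str.split?]
  rw [show "-".toList = ['-'] from by decide]
  rw [PySem.Chars.split?]
  simp [pvSplitOn_eq]

-- ===== VERDICT (by name: the statement is the Claim_ definition above) =====
theorem checkregno_spec : Claim_equal_checkregno := by
  intro regno _
  show checkregno regno = checkregno_alt regno
  rw [show checkregno_alt regno = pvPsi 0 (pvSplitDash regno.toList) from by
    rw [checkregno_alt, pvRun_eq]]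
  simp only [checkregno]
  rw [pvArr_eq regno]
  have hnd := pvSplitDash_no_dash regno.toList
  have hne := pvSplitDash_ne_nil regno.toList
  obtain ⟨pss, hg⟩ : ∃ x, pvSplitDash regno.toList = x := ⟨_, rfl⟩
  rw [hg] at hnd hne ⊢
  rcases pss with _ | ⟨p, _ | ⟨q, _ | ⟨r, _ | ⟨t, _ | ⟨u, ps⟩⟩⟩⟩⟩
  · exact absurd rfl hne
  · rw [if_pos (by simp), psi1 p (hnd p (by simp))]
  · rw [if_pos (by simp), psi2 p q (hnd p (by simp)) (hnd q (by simp))]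
  · rw [if_pos (by simp),
      psi3 p q r (hnd p (by simp)) (hnd q (by simp)) (hnd r (by simp))]
  · rw [if_neg (by simp),
      psi4 p q r t (hnd p (by simp)) (hnd q (by simp)) (hnd r (by simp)) (hnd t (by simp))]
    simp only [List.map_cons, List.map_nil, List.getD, List.getElem?_cons_zero,
      List.getElem?_cons_succ, Option.getD_some, PySem.Str.len_eq,
      String.toList_ofList, pvLoopA_eq_all]
    have e1 : ((p.length : Int) = 2) ↔ (p.length = 2) := by omega
    have e2 : ((q.length : Int) = 2) ↔ (q.length = 2) := by omega
    have e3 : ((r.length : Int) ≤ 2) ↔ (r.length ≤ 2) := by omega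
    have e4 : ((t.length : Int) ≤ 4) ↔ (t.length ≤ 4) := by omega
    split_ifs <;> simp_all [pvIsL, pvIsD]
  · rw [if_pos (by simp),
      psi5 p q r t u ps (hnd p (by simp)) (hnd q (by simp)) (hnd r (by simp)) (hnd t (by simp))]
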